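-- pv_equiv track=rewrite | github.com/mkshariharan07-hub/plantdec-qc | utils.py | get_botanical_equivalent
-- ===== SOURCE A (Python) =====
-- from typing import Optional, Dict
--
-- CROSS_REFERENCE_MATRIX: Dict[str, Dict[str, str]] = {
--     "dogwood": {
--         "scab": "Dogwood Anthracnose / Septoria",
--         "blight": "Dogwood Anthracnose",
--         "spot": "Septoria Leaf Spot"
--     },
--     "cucumber": {
--         "scab": "Angular Leaf Spot",
--         "blight": "Downy Mildew",
--         "spot": "Angular Leaf Spot"
--     },
--     "tomato": {
--         "scab": "Septoria Leaf Spot",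
--         "blight": "Early/Late Blight",
--         "spot": "Target Spot"
--     },
--     "potato": {
--         "scab": "Common Scab",
--         "blight": "Late Blight"
--     }
-- }
--
-- def get_botanical_equivalent(host: str, visual_pattern: str) -> Optional[str]:
--     """Look up the scientifically accurate disease name for a specific host based on visual pattern."""
--     host_key = host.lower()
--     pattern_key = visual_pattern.lower().replace("_", " ")
--
--     # Check for host match
--     for h_key, patterns in CROSS_REFERENCE_MATRIX.items():
--         if h_key in host_key:
--             # Check for pattern match
--             for p_key, actual_name in patterns.items():
--                 if p_key in pattern_key:
--                     return actual_name
--     return None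
-- ===== SOURCE B (Python) =====
-- # Staged classification: classify the visual pattern ONCE into a class index
-- # (scab=0, blight=1, spot=2), then one pass over hosts with a 2D name grid
-- # (potato has no "spot" entry, hence a None cell which the host pass skips).
-- HOSTS = ["dogwood", "cucumber", "tomato", "potato"]
-- PATTERNS = ["scab", "blight", "spot"]
-- TABLE = [
--     ["Dogwood Anthracnose / Septoria", "Dogwood Anthracnose", "Septoria Leaf Spot"],
--     ["Angular Leaf Spot", "Downy Mildew", "Angular Leaf Spot"],
--     ["Septoria Leaf Spot", "Early/Late Blight", "Target Spot"],
--     ["Common Scab", "Late Blight", None],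
-- ]
--
-- def _run(host_key, pattern_key):
--     pi = next((j for j, p in enumerate(PATTERNS) if p in pattern_key), None)
--     if pi is None:
--         return None
--     for i, h in enumerate(HOSTS):
--         if h in host_key and TABLE[i][pi] is not None:
--             return TABLE[i][pi]
--     return None
--
-- def get_botanical_equivalent(host, visual_pattern):
--     return _run(host.lower(), visual_pattern.lower().replace("_", " "))
-- ===== Notes on version B (the rewrite author's own statement) =====
-- stated objective: alternative
-- what changed: Replaced A's nested host-then-pattern substring scan (up to 4x3 tests) with a staged classification: the pattern is classified once into an index over [scab,blight,spot], then a single host pass looks the answer up in a 2D name grid whose potato/spot cell is None (skipped), reproducing A's first-match semantics with at most 3+4 tests.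
import Mathlib
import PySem

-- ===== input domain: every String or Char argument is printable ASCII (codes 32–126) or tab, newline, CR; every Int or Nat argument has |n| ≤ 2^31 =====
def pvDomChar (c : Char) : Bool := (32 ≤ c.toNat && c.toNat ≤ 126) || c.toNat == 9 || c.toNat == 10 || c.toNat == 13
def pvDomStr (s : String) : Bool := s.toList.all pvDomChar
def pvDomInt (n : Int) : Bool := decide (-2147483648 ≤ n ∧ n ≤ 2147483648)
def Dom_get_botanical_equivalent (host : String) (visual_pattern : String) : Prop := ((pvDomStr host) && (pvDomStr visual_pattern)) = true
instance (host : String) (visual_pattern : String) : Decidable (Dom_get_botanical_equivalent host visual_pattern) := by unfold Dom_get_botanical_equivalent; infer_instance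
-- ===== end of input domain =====

-- B classifies the pattern once into an index and does one host pass over a 2D name grid (objective: alternative).


-- ===== PORT A =====
-- the nested CROSS_REFERENCE_MATRIX as a list of (host_key, patterns) pairs in insertion order
def pvMatrix : List (String × List (String × String)) :=
  [ ("dogwood", [("scab", "Dogwood Anthracnose / Septoria"), ("blight", "Dogwood Anthracnose"), ("spot", "Septoria Leaf Spot")]),
    ("cucumber", [("scab", "Angular Leaf Spot"), ("blight", "Downy Mildew"), ("spot", "Angular Leaf Spot")]),
    ("tomato", [("scab", "Septoria Leaf Spot"), ("blight", "Early/Late Blight"), ("spot", "Target Spot")]),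
    ("potato", [("scab", "Common Scab"), ("blight", "Late Blight")]) ]

-- inner loop of A: first pattern whose key occurs in pattern_key
def pvFindPat (pk : String) : List (String × String) → Option String
  | [] => none
  | (p, name) :: rest => if PySem.Str.isIn p pk then some name else pvFindPat pk rest

-- outer loop of A: on a host match, run the inner loop; a return exits, otherwise keep scanning
def pvScanA (hk pk : String) : List (String × List (String × String)) → Option String
  | [] => none
  | (h, pats) :: rest =>
    if PySem.Str.isIn h hk then
      match pvFindPat pk pats with
      | some v => some v
      | none => pvScanA hk pk rest
    else pvScanA hk pk rest

def get_botanical_equivalent (host : String) (visual_pattern : String) : Option String :=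
  pvScanA (PySem.Str.lower host) (PySem.Str.replace (PySem.Str.lower visual_pattern) "_" " ") pvMatrix

-- ===== PORT B =====
def pvHosts : List String := ["dogwood", "cucumber", "tomato", "potato"]
def pvPatterns : List String := ["scab", "blight", "spot"]
-- 2D name grid; the potato/spot cell is none
def pvTable : List (List (Option String)) :=
  [ [some "Dogwood Anthracnose / Septoria", some "Dogwood Anthracnose", some "Septoria Leaf Spot"],
    [some "Angular Leaf Spot", some "Downy Mildew", some "Angular Leaf Spot"],
    [some "Septoria Leaf Spot", some "Early/Late Blight", some "Target Spot"],
    [some "Common Scab", some "Late Blight", none] ]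

-- pattern classification: index of the first pattern keyword occurring in pattern_key
def pvPatIdx (pk : String) : List (Int × String) → Option Int
  | [] => none
  | (j, p) :: rest => if PySem.Str.isIn p pk then some j else pvPatIdx pk rest

-- TABLE[i][pi] lookup
def pvCell (i pi : Int) : Option String := PySem.List.pyGetD (PySem.List.pyGetD pvTable i []) pi none

-- host pass: first matching host whose grid cell is not none
def pvHostPass (hk : String) (pi : Int) : List (Int × String) → Option String
  | [] => none
  | (i, h) :: rest =>
    if PySem.Str.isIn h hk && (pvCell i pi).isSome then pvCell i pi else pvHostPass hk pi rest

-- body of B after normalization: classify the pattern, then run the host pass (None class -> None)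
def pvRunB (hk pk : String) : Option String :=
  match pvPatIdx pk (PySem.List.enumerate pvPatterns) with
  | none => none
  | some pi => pvHostPass hk pi (PySem.List.enumerate pvHosts)

def get_botanical_equivalent_alt (host : String) (visual_pattern : String) : Option String :=
  pvRunB (PySem.Str.lower host) (PySem.Str.replace (PySem.Str.lower visual_pattern) "_" " ")

-- ===== PRECONDITION & SPEC =====
def Spec_get_botanical_equivalent (host : String) (visual_pattern : String) (out : Option String) : Prop := out = get_botanical_equivalent_alt host visual_pattern
instance (host : String) (visual_pattern : String) (out : Option String) : Decidable (Spec_get_botanical_equivalent host visual_pattern out) := by unfold Spec_get_botanical_equivalent; infer_instance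

-- ===== CLAIM (what is proved, stated in full; the proofs are below) =====
def Claim_equal_get_botanical_equivalent : Prop := ∀ (host : String) (visual_pattern : String), Dom_get_botanical_equivalent host visual_pattern → Spec_get_botanical_equivalent host visual_pattern (get_botanical_equivalent host visual_pattern)

-- ===== LEMMAS AND PROOFS =====

-- nested scan over the fixed matrix = staged classification + host pass, by cases on the 7 substring tests
set_option maxHeartbeats 2000000 in
theorem pvScan_eq (hk pk : String) :
    pvScanA hk pk pvMatrix = pvRunB hk pk := by
  simp only [pvRunB, pvMatrix, pvPatterns, pvHosts, pvTable, PySem.List.enumerate, pvScanA,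
    pvFindPat, pvPatIdx, pvHostPass, pvCell]
  generalize PySem.Str.isIn "dogwood" hk = b1
  generalize PySem.Str.isIn "cucumber" hk = b2
  generalize PySem.Str.isIn "tomato" hk = b3
  generalize PySem.Str.isIn "potato" hk = b4
  generalize PySem.Str.isIn "scab" pk = c1
  generalize PySem.Str.isIn "blight" pk = c2
  generalize PySem.Str.isIn "spot" pk = c3
  cases b1 <;> cases b2 <;> cases b3 <;> cases b4 <;> cases c1 <;> cases c2 <;> cases c3 <;> rfl

-- ===== VERDICT (by name: the statement is the Claim_ definition above) =====
set_option maxHeartbeats 2000000 in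
theorem get_botanical_equivalent_spec : Claim_equal_get_botanical_equivalent := by
  intro host visual_pattern _
  unfold Spec_get_botanical_equivalent get_botanical_equivalent get_botanical_equivalent_alt
  exact pvScan_eq _ _
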